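-- pv_equiv track=rewrite | github.com/DevDanielNAM/Coding-Test | 프로그래머스/0/120853. 컨트롤 제트/컨트롤 제트.py | solution
-- ===== SOURCE A (Python) =====
-- def solution(s):
--     answer = 0
--     s_list = list(s.split())
--     stack = []
--
--     for char in s_list:
--         if char == 'Z':
--             stack.append(-stack[-1])
--         else:
--             stack.append(int(char))
--
--     answer = sum(stack)
--
--     return answer
-- ===== SOURCE B (Python) =====
-- def solution(s):
--     toks = s.split()
--     total = 0
--     i = 0
--     while i < len(toks):
--         n = int(toks[i])
--         j = i + 1
--         while j < len(toks) and toks[j] == 'Z':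
--             j += 1
--         # a number followed by k 'Z' tokens contributes n, -n, n, ... :
--         # the group sums to n when k is even and to 0 when k is odd
--         if (j - i - 1) % 2 == 0:
--             total += n
--         i = j
--     return total
-- ===== Notes on version B (the rewrite author's own statement) =====
-- stated objective: alternative
-- what changed: Replaces the negate-the-previous-value stack with run-length grouping: each number is grouped with its following run of 'Z' tokens, and the number is added exactly when that run length is even (an alternating group telescopes to n or 0).
-- outside the precondition, e.g. on solution('Z'): A raises IndexError, B raises ValueError
import Mathlib
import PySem

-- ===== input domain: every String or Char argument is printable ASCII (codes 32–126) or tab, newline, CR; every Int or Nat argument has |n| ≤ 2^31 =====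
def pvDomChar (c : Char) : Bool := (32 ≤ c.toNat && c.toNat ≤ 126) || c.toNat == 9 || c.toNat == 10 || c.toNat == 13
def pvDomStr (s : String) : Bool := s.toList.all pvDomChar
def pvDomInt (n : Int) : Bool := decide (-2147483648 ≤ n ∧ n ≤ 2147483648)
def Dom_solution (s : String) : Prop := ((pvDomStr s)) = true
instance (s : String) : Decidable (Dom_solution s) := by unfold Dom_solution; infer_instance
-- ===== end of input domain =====

-- B replaces A's negate-previous stack by run-length grouping: each number with its
-- following run of 'Z' tokens; the number counts exactly when that run length is even.

-- ===== PORT A =====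
-- loop state: the stack; none = a Python exception was raised (IndexError / ValueError)
def solAStep (st : Option (List Int)) (tok : String) : Option (List Int) :=
  match st with
  | none => none
  | some stack =>
    if tok == "Z" then
      (PySem.List.pyGet? stack (-1)).map (fun x => stack ++ [-x])
    else
      (PySem.Int.ofStr? tok).map (fun n => stack ++ [n])

def solution (s : String) : Int :=
  ((((PySem.Str.split₀ s).foldl solAStep (some [])).map (fun st => st.sum)).getD 0)

-- ===== PORT B =====
-- inner while loop of Source B: split off the leading run of "Z" tokens
def countZ : List String → Nat × List String
  | [] => (0, [])
  | t :: ts => if t == "Z" then ((countZ ts).1 + 1, (countZ ts).2) else (0, t :: ts)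

lemma countZ_len_le : ∀ ts : List String, (countZ ts).2.length ≤ ts.length := by
  intro ts
  induction ts with
  | nil => simp [countZ]
  | cons t ts ih =>
    by_cases h : t == "Z" <;> simp [countZ, h] <;> omega

-- outer while loop of Source B: take the next number, consume its Z-run, add it iff the run
-- length is even; none = ValueError from int() (also on a leading 'Z' group head)
def solBGo (toks : List String) : Option Int :=
  match toks with
  | [] => some 0
  | t :: ts =>
    match PySem.Int.ofStr? t with
    | none => none
    | some n =>
      (solBGo (countZ ts).2).map
        (fun rest => (if (countZ ts).1 % 2 = 0 then n else 0) + rest)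
termination_by toks.length
decreasing_by
  have := countZ_len_le ts
  simp; omega

def solution_alt (s : String) : Int :=
  (solBGo (PySem.Str.split₀ s)).getD 0

-- ===== PRECONDITION & SPEC =====
-- Pre_ excludes exactly the inputs where A raises: a leading 'Z' token (IndexError
-- from stack[-1] on the empty stack) or a non-'Z' token that int() rejects (ValueError).
def Pre_solution (s : String) : Prop :=
  (PySem.Str.split₀ s).head? ≠ some "Z" ∧
  ∀ t ∈ PySem.Str.split₀ s, t ≠ "Z" → (PySem.Int.ofStr? t).isSome = true
instance (s : String) : Decidable (Pre_solution s) := by unfold Pre_solution; infer_instance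

def pvWitness_solution : String := ("1 Z 2")

def Spec_solution (s : String) (out : Int) : Prop := out = solution_alt s
instance (s : String) (out : Int) : Decidable (Spec_solution s out) := by unfold Spec_solution; infer_instance

-- ===== CLAIM (what is proved, stated in full; the proofs are below) =====
def Claim_equal_solution : Prop := ∀ (s : String), Dom_solution s → Pre_solution s → Spec_solution s (solution s)

-- ===== LEMMAS AND PROOFS =====

lemma countZ_spec : ∀ ts : List String,
    ts = List.replicate (countZ ts).1 "Z" ++ (countZ ts).2 ∧ (countZ ts).2.head? ≠ some "Z" := by
  intro ts
  induction ts with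
  | nil => simp [countZ]
  | cons t ts ih =>
    by_cases h : t = "Z"
    · subst h
      simp only [countZ, beq_self_eq_true, if_true]
      exact ⟨by rw [List.replicate_succ, List.cons_append]; exact congrArg _ ih.1, ih.2⟩
    · simp [countZ, h]

-- A run of k 'Z' tokens on a stack with last element L appends -L, L, -L, …
lemma zrun : ∀ (k : Nat) (stack : List Int) (L : Int),
    PySem.List.pyGet? stack (-1) = some L →
    ∃ st', (List.replicate k "Z").foldl solAStep (some stack) = some st' ∧
      st'.sum = stack.sum + (if k % 2 = 0 then 0 else -L) ∧
      PySem.List.pyGet? st' (-1) = some (if k % 2 = 0 then L else -L) := by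
  intro k
  induction k with
  | zero => intro stack L hL; exact ⟨stack, rfl, by simp, by simpa using hL⟩
  | succ k ih =>
    intro stack L hL
    have hA : solAStep (some stack) "Z" = some (stack ++ [-L]) := by
      simp [solAStep, hL]
    obtain ⟨st', h1, h2, h3⟩ :=
      ih (stack ++ [-L]) (-L) (PySem.List.pyGet?_neg_one_append_singleton _ _)
    refine ⟨st', ?_, ?_, ?_⟩
    · simpa [List.replicate_succ, List.foldl_cons, hA] using h1
    · rw [h2, List.sum_append]
      rcases Nat.even_or_odd k with he | ho
      · have hk : k % 2 = 0 := Nat.even_iff.mp he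
        have hk1 : (k + 1) % 2 ≠ 0 := by omega
        simp [hk, hk1]
      · have hk : k % 2 ≠ 0 := by have := Nat.odd_iff.mp ho; omega
        have hk1 : (k + 1) % 2 = 0 := by have := Nat.odd_iff.mp ho; omega
        simp [hk, hk1]
    · rcases Nat.even_or_odd k with he | ho
      · have hk : k % 2 = 0 := Nat.even_iff.mp he
        have hk1 : (k + 1) % 2 ≠ 0 := by omega
        simpa [hk, hk1] using h3
      · have hk : k % 2 ≠ 0 := by have := Nat.odd_iff.mp ho; omega
        have hk1 : (k + 1) % 2 = 0 := by have := Nat.odd_iff.mp ho; omega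
        simpa [hk, hk1] using h3

-- Main invariant: on a token list whose head is a number, A's stack fold succeeds and
-- its stack sum grows by exactly B's group-parity value.
lemma main_rel : ∀ (N : Nat) (toks : List String) (stack : List Int),
    toks.length ≤ N →
    toks.head? ≠ some "Z" →
    (∀ t ∈ toks, t ≠ "Z" → (PySem.Int.ofStr? t).isSome = true) →
    ∃ st' v, toks.foldl solAStep (some stack) = some st' ∧
      solBGo toks = some v ∧ st'.sum = stack.sum + v := by
  intro N
  induction N with
  | zero =>
    intro toks stack hlen _ _
    have : toks = [] := List.eq_nil_of_length_eq_zero (by omega)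
    subst this
    exact ⟨stack, 0, rfl, by simp [solBGo], by simp⟩
  | succ N ih =>
    intro toks stack hlen hhead hp
    cases toks with
    | nil => exact ⟨stack, 0, rfl, by simp [solBGo], by simp⟩
    | cons t ts =>
      have hz : t ≠ "Z" := by intro h; exact hhead (by rw [h]; rfl)
      obtain ⟨n, hn⟩ := Option.isSome_iff_exists.mp (hp t (List.mem_cons_self) hz)
      have hA : solAStep (some stack) t = some (stack ++ [n]) := by
        simp [solAStep, hz, hn]
      obtain ⟨hts, hrhead⟩ := countZ_spec ts
      set k := (countZ ts).1 with hk
      set r := (countZ ts).2 with hr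
      obtain ⟨st₂, hz1, hz2, hz3⟩ :=
        zrun k (stack ++ [n]) n (PySem.List.pyGet?_neg_one_append_singleton _ _)
      have hrsub : ∀ u ∈ r, u ∈ ts := by
        intro u hu; rw [hts]; exact List.mem_append_right _ hu
      have hrlen : r.length ≤ N := by
        have h1 : r.length ≤ ts.length := countZ_len_le ts
        simp at hlen; omega
      obtain ⟨st', v, h1, h2, h3⟩ :=
        ih r st₂ hrlen hrhead
          (fun u hu => hp u (List.mem_cons_of_mem _ (hrsub u hu)))
      refine ⟨st', (if k % 2 = 0 then n else 0) + v, ?_, ?_, ?_⟩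
      · calc (t :: ts).foldl solAStep (some stack)
            = ts.foldl solAStep (some (stack ++ [n])) := by
              rw [List.foldl_cons, hA]
          _ = (List.replicate k "Z" ++ r).foldl solAStep (some (stack ++ [n])) := by
              rw [← hts]
          _ = r.foldl solAStep (some st₂) := by rw [List.foldl_append, hz1]
          _ = some st' := h1
      · simp only [solBGo, hn, ← hk, ← hr, h2, Option.map_some]
      · rw [h3, hz2, List.sum_append]
        rcases Nat.decEq (k % 2) 0 with h | h <;> simp [h] <;> ring

-- ===== VERDICT (by name: the statement is the Claim_ definition above) =====
theorem solution_spec : Claim_equal_solution := by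
  intro s _ hpre
  unfold Spec_solution solution solution_alt
  obtain ⟨hhead, hp⟩ := hpre
  obtain ⟨st', v, h1, h2, h3⟩ :=
    main_rel (PySem.Str.split₀ s).length (PySem.Str.split₀ s) [] le_rfl hhead hp
  rw [h1, h2]
  simpa using h3
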